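-- pv_equiv track=rewrite | github.com/puyopop/atcoder-workspace | arc040/B/main.py | solve
-- ===== SOURCE A (Python) =====
-- def solve(N: int, R: int, S: str):
--     '''
--     >>> solve(3, 1, "o.o")
--     2
--     >>> solve(3, 2, "o.o")
--     1
--     >>> solve(3, 10000, "o.o")
--     1
--     '''
--     t = S.rfind(".")
--     if t == -1:
--         return 0
--     c, i = max(t-R+1, 0), t
--     while i >= 0:
--         i = i - R
--         c += 1
--         while i >= 0 and S[i] == "o":
--             i -= 1
--     return c
-- ===== SOURCE B (Python) =====
-- def solve(N: int, R: int, S: str):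
--     t = S.rfind(".")
--     if t == -1:
--         return 0
--     count = max(t - R + 1, 0)
--     covered = 0
--     for i in range(t + 1):
--         if i >= covered and S[i] != "o":
--             count += 1
--             covered = i + R
--     return count
-- ===== Notes on version B (the rewrite author's own statement) =====
-- stated objective: alternative
-- what changed: Replaces A's right-to-left jump-by-R scan with inner skip-'o' loop by a closed-form offset max(t-R+1,0) plus a single left-to-right pass keeping a 'next uncovered index' pointer; equal by the classic two-sided greedy interval-covering argument.
import Mathlib
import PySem

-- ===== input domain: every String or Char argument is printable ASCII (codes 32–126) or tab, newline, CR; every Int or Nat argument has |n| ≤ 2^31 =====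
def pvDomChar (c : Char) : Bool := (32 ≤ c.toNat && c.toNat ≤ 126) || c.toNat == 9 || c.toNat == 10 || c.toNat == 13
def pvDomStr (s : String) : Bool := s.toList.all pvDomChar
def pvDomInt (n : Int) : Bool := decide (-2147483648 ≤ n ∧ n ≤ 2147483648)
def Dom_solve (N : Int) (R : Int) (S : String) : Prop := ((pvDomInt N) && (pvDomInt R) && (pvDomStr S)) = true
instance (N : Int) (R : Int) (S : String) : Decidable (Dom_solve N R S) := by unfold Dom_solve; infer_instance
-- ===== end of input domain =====

-- B replaces A's right-to-left jump-by-R scan (with an inner skip-'o' loop) by the closed-form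
-- offset max(t-R+1,0) plus a single left-to-right pass with a 'next uncovered index' pointer.

-- ===== PORT A =====
-- inner loop: while i >= 0 and S[i] == "o": i -= 1
def solveSkip (cs : List Char) (i : Int) : Int :=
  if h : 0 ≤ i ∧ PySem.List.pyGet? cs i = some 'o' then solveSkip cs (i - 1) else i
termination_by (i + 1).toNat
decreasing_by omega

-- outer loop: while i >= 0: i = i - R; c += 1; <inner loop>   (fuel: under Pre_ each
-- iteration decreases i by at least 1, so (t+1).toNat + 1 fuel always reaches i < 0)
def solveLoop (cs : List Char) (R : Int) : Nat → Int → Int → Int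
  | 0, _, c => c
  | fuel + 1, i, c =>
      if 0 ≤ i then solveLoop cs R fuel (solveSkip cs (i - R)) (c + 1) else c

def solve (N : Int) (R : Int) (S : String) : Int :=
  if PySem.Str.rfind S "." = -1 then 0
  else solveLoop S.toList R ((PySem.Str.rfind S "." + 1).toNat + 1)
    (PySem.Str.rfind S ".") (max (PySem.Str.rfind S "." - R + 1) 0)

-- ===== PORT B =====
-- loop body: if i >= covered and S[i] != "o": count += 1; covered = i + R
def solveAltStep (cs : List Char) (R : Int) (st : Int × Int) (i : Int) : Int × Int :=
  if st.2 ≤ i ∧ ¬ PySem.List.pyGet? cs i = some 'o' then (st.1 + 1, i + R) else st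

def solve_alt (N : Int) (R : Int) (S : String) : Int :=
  if PySem.Str.rfind S "." = -1 then 0
  else ((PySem.List.pyRange 0 (PySem.Str.rfind S "." + 1) 1).foldl
    (solveAltStep S.toList R) (max (PySem.Str.rfind S "." - R + 1) 0, 0)).1

-- ===== PRECONDITION & SPEC =====
-- Pre_ excludes exactly the inputs on which A does not return: when '.' occurs in S and
-- R ≤ 0, A's outer loop never brings i below 0 (it diverges for R = 0, raises IndexError for R < 0).
def Pre_solve (N : Int) (R : Int) (S : String) : Prop := 1 ≤ R ∨ ¬ '.' ∈ S.toList
instance (N : Int) (R : Int) (S : String) : Decidable (Pre_solve N R S) := by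
  unfold Pre_solve; infer_instance

def pvWitness_solve : Int × Int × String := (3, 1, "o.o")

def Spec_solve (N : Int) (R : Int) (S : String) (out : Int) : Prop := out = solve_alt N R S
instance (N : Int) (R : Int) (S : String) (out : Int) : Decidable (Spec_solve N R S out) := by
  unfold Spec_solve; infer_instance

-- ===== CLAIM (what is proved, stated in full; the proofs are below) =====
def Claim_equal_solve : Prop := ∀ (N : Int) (R : Int) (S : String), Dom_solve N R S → Pre_solve N R S → Spec_solve N R S (solve N R S)

-- ===== LEMMAS AND PROOFS =====

-- the indices ≤ i that still need a stamp ("points": characters ≠ 'o')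
noncomputable def pts (cs : List Char) (i : Int) : Finset Int :=
  (Finset.Icc 0 i).filter (fun j => ¬ PySem.List.pyGet? cs j = some 'o')

-- right-to-left greedy stamp count on a finite point set
noncomputable def Gcnt (R : Int) (P : Finset Int) : Int :=
  if h : P.Nonempty then
    1 + Gcnt R ((P.erase (P.max' h)).filter (fun x => x ≤ P.max' h - R))
  else 0
termination_by P.card
decreasing_by
  exact lt_of_le_of_lt (Finset.card_le_card (Finset.filter_subset _ _))
    (Finset.card_erase_lt_of_mem (P.max'_mem h))

-- left-to-right greedy stamp count
noncomputable def Lcnt (R : Int) (P : Finset Int) : Int :=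
  if h : P.Nonempty then
    1 + Lcnt R ((P.erase (P.min' h)).filter (fun x => P.min' h + R ≤ x))
  else 0
termination_by P.card
decreasing_by
  exact lt_of_le_of_lt (Finset.card_le_card (Finset.filter_subset _ _))
    (Finset.card_erase_lt_of_mem (P.min'_mem h))

theorem Gcnt_empty (R : Int) : Gcnt R ∅ = 0 := by rw [Gcnt]; simp

theorem Lcnt_empty (R : Int) : Lcnt R ∅ = 0 := by rw [Lcnt]; simp

theorem Gcnt_eq (R : Int) (hR : 1 ≤ R) (P : Finset Int) (h : P.Nonempty) :
    Gcnt R P = 1 + Gcnt R (P.filter (fun x => x ≤ P.max' h - R)) := by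
  rw [Gcnt]; simp only [dif_pos h]
  congr 2
  rw [Finset.filter_erase, Finset.erase_eq_self.2]
  simp only [Finset.mem_filter]
  rintro ⟨-, hle⟩; omega

theorem Lcnt_eq (R : Int) (hR : 1 ≤ R) (P : Finset Int) (h : P.Nonempty) :
    Lcnt R P = 1 + Lcnt R (P.filter (fun x => P.min' h + R ≤ x)) := by
  rw [Lcnt]; simp only [dif_pos h]
  congr 2
  rw [Finset.filter_erase, Finset.erase_eq_self.2]
  simp only [Finset.mem_filter]
  rintro ⟨-, hle⟩; omega

-- the two greedy directions count the same number of stamps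
theorem Lcnt_eq_Gcnt (R : Int) (hR : 1 ≤ R) (P : Finset Int) : Lcnt R P = Gcnt R P := by
  induction P using Finset.strongInduction with
  | _ P IH =>
    by_cases h : P.Nonempty
    · have hm := P.min'_mem h
      have hM := P.max'_mem h
      rw [Lcnt_eq R hR P h, Gcnt_eq R hR P h]
      by_cases hc : P.max' h - R < P.min' h
      · have h1 : P.filter (fun x => P.min' h + R ≤ x) = ∅ := by
          rw [Finset.filter_eq_empty_iff]
          intro x hx
          have := P.le_max' x hx
          omega
        have h2 : P.filter (fun x => x ≤ P.max' h - R) = ∅ := by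
          rw [Finset.filter_eq_empty_iff]
          intro x hx
          have := P.min'_le x hx
          omega
        rw [h1, h2, Lcnt_empty, Gcnt_empty]
      · push_neg at hc
        have hMP1 : P.max' h ∈ P.filter (fun x => P.min' h + R ≤ x) := by
          rw [Finset.mem_filter]; exact ⟨hM, by omega⟩
        have hmP2 : P.min' h ∈ P.filter (fun x => x ≤ P.max' h - R) := by
          rw [Finset.mem_filter]; exact ⟨hm, by omega⟩
        have hP1ss : P.filter (fun x => P.min' h + R ≤ x) ⊂ P := by
          refine (Finset.ssubset_iff_of_subset (Finset.filter_subset _ _)).2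
            ⟨P.min' h, hm, ?_⟩
          rw [Finset.mem_filter]; rintro ⟨-, hx⟩; omega
        have hP2ss : P.filter (fun x => x ≤ P.max' h - R) ⊂ P := by
          refine (Finset.ssubset_iff_of_subset (Finset.filter_subset _ _)).2
            ⟨P.max' h, hM, ?_⟩
          rw [Finset.mem_filter]; rintro ⟨-, hx⟩; omega
        have hP1ne : (P.filter (fun x => P.min' h + R ≤ x)).Nonempty := ⟨_, hMP1⟩
        have hP2ne : (P.filter (fun x => x ≤ P.max' h - R)).Nonempty := ⟨_, hmP2⟩
        have hmaxP1 : (P.filter (fun x => P.min' h + R ≤ x)).max' hP1ne = P.max' h := by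
          refine le_antisymm (Finset.max'_le _ _ _ fun x hx => ?_) (Finset.le_max' _ _ hMP1)
          exact P.le_max' x (Finset.filter_subset _ _ hx)
        have hminP2 : (P.filter (fun x => x ≤ P.max' h - R)).min' hP2ne = P.min' h := by
          refine le_antisymm (Finset.min'_le _ _ hmP2) (Finset.le_min' _ _ _ fun x hx => ?_)
          exact P.min'_le x (Finset.filter_subset _ _ hx)
        have hcomm : (P.filter (fun x => P.min' h + R ≤ x)).filter
              (fun x => x ≤ (P.filter (fun x => P.min' h + R ≤ x)).max' hP1ne - R)
            = (P.filter (fun x => x ≤ P.max' h - R)).filter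
              (fun x => (P.filter (fun x => x ≤ P.max' h - R)).min' hP2ne + R ≤ x) := by
          rw [hmaxP1, hminP2, Finset.filter_filter, Finset.filter_filter]
          apply Finset.filter_congr
          intro x hx
          constructor
          · rintro ⟨h1, h2⟩; exact ⟨h2, h1⟩
          · rintro ⟨h1, h2⟩; exact ⟨h2, h1⟩
        rw [IH _ hP1ss, Gcnt_eq R hR _ hP1ne, hcomm, ← IH _ hP2ss,
          Lcnt_eq R hR _ hP2ne,
          IH _ (Finset.ssubset_of_subset_of_ssubset (Finset.filter_subset _ _) hP2ss)]
    · rw [Finset.not_nonempty_iff_eq_empty] at h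
      subst h; rw [Lcnt_empty, Gcnt_empty]

theorem pts_of_neg (cs : List Char) (i : Int) (hi : i < 0) : pts cs i = ∅ := by
  unfold pts
  rw [Finset.Icc_eq_empty (by omega), Finset.filter_empty]

theorem solveSkip_spec (cs : List Char) (i : Int) :
    solveSkip cs i ≤ i ∧
      (0 ≤ solveSkip cs i → ¬ PySem.List.pyGet? cs (solveSkip cs i) = some 'o') ∧
      pts cs (solveSkip cs i) = pts cs i := by
  induction i using solveSkip.induct cs with
  | case1 i h IH =>
    rw [solveSkip, dif_pos h]
    refine ⟨by omega, IH.2.1, ?_⟩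
    rw [IH.2.2]
    unfold pts
    apply Finset.ext
    intro j
    simp only [Finset.mem_filter, Finset.mem_Icc]
    constructor
    · rintro ⟨⟨h0, h1⟩, hp⟩; exact ⟨⟨h0, by omega⟩, hp⟩
    · rintro ⟨⟨h0, h1⟩, hp⟩
      refine ⟨⟨h0, ?_⟩, hp⟩
      rcases eq_or_lt_of_le h1 with heq | hlt
      · exact absurd (heq ▸ h.2) hp
      · omega
  | case2 i h =>
    rw [solveSkip, dif_neg h]
    exact ⟨le_refl _, fun h0 hget => h ⟨h0, hget⟩, rfl⟩

theorem pts_filter (cs : List Char) (i R : Int) (hR : 1 ≤ R) :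
    (pts cs i).filter (fun x => x ≤ i - R) = pts cs (i - R) := by
  unfold pts
  rw [Finset.filter_filter]
  apply Finset.ext
  intro j
  simp only [Finset.mem_filter, Finset.mem_Icc, and_assoc]
  constructor
  · rintro ⟨h0, h1, hp, h2⟩; exact ⟨h0, h2, hp⟩
  · rintro ⟨h0, h1, hp⟩; exact ⟨h0, by omega, hp, h1⟩

theorem solveLoop_spec (cs : List Char) (R : Int) (hR : 1 ≤ R) :
    ∀ (fuel : Nat) (i c : Int), i < (fuel : Int) →
      (0 ≤ i → ¬ PySem.List.pyGet? cs i = some 'o') →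
      solveLoop cs R fuel i c = c + Gcnt R (pts cs i) := by
  intro fuel
  induction fuel with
  | zero =>
    intro i c hfuel hpt
    rw [pts_of_neg cs i (by exact_mod_cast hfuel), Gcnt_empty]
    simp [solveLoop]
  | succ f IH =>
    intro i c hfuel hpt
    by_cases h0 : 0 ≤ i
    · have hmem : i ∈ pts cs i := by
        unfold pts
        rw [Finset.mem_filter, Finset.mem_Icc]
        exact ⟨⟨h0, le_refl _⟩, hpt h0⟩
      have hne : (pts cs i).Nonempty := ⟨i, hmem⟩
      have hmax : (pts cs i).max' hne = i := by
        refine le_antisymm (Finset.max'_le _ _ _ fun x hx => ?_) (Finset.le_max' _ _ hmem)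
        unfold pts at hx
        rw [Finset.mem_filter, Finset.mem_Icc] at hx
        exact hx.1.2
      have hskip := solveSkip_spec cs (i - R)
      simp only [solveLoop, if_pos h0]
      rw [IH (solveSkip cs (i - R)) (c + 1) (by push_cast at hfuel ⊢; omega) hskip.2.1,
        hskip.2.2, Gcnt_eq R hR (pts cs i) hne, hmax, pts_filter cs i R hR]
      ring
    · simp only [solveLoop, if_neg h0]
      rw [pts_of_neg cs i (by omega), Gcnt_empty]
      ring

-- remaining work of B's fold from index a on, with 'covered' = cov
theorem foldB_spec (cs : List Char) (R t : Int) (hR : 1 ≤ R) :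
    ∀ (a : Int) (c cov : Int),
      ((PySem.List.pyRange a (t + 1) 1).foldl (solveAltStep cs R) (c, cov)).1
        = c + Lcnt R ((Finset.Icc a t).filter
            (fun j => cov ≤ j ∧ ¬ PySem.List.pyGet? cs j = some 'o')) := by
  intro a
  induction hn : (t + 1 - a).toNat using Nat.strong_induction_on generalizing a with
  | _ n IH =>
    intro c cov
    by_cases ha : a < t + 1
    · rw [PySem.List.pyRange_one_cons ha, List.foldl_cons]
      by_cases hbr : cov ≤ a ∧ ¬ PySem.List.pyGet? cs a = some 'o'
      · have hmem : a ∈ (Finset.Icc a t).filter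
            (fun j => cov ≤ j ∧ ¬ PySem.List.pyGet? cs j = some 'o') := by
          rw [Finset.mem_filter, Finset.mem_Icc]
          exact ⟨⟨le_refl _, by omega⟩, hbr⟩
        have hne : ((Finset.Icc a t).filter
            (fun j => cov ≤ j ∧ ¬ PySem.List.pyGet? cs j = some 'o')).Nonempty := ⟨a, hmem⟩
        have hmin : ((Finset.Icc a t).filter
            (fun j => cov ≤ j ∧ ¬ PySem.List.pyGet? cs j = some 'o')).min' hne = a := by
          refine le_antisymm (Finset.min'_le _ _ hmem) (Finset.le_min' _ _ _ fun x hx => ?_)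
          rw [Finset.mem_filter, Finset.mem_Icc] at hx
          exact hx.1.1
        have hnext : ((Finset.Icc a t).filter
              (fun j => cov ≤ j ∧ ¬ PySem.List.pyGet? cs j = some 'o')).filter
              (fun x => a + R ≤ x)
            = (Finset.Icc (a + 1) t).filter
                (fun j => a + R ≤ j ∧ ¬ PySem.List.pyGet? cs j = some 'o') := by
          rw [Finset.filter_filter]
          apply Finset.ext
          intro j
          simp only [Finset.mem_filter, Finset.mem_Icc, and_assoc]
          constructor
          · rintro ⟨h1, h2, hc2, hp, hr⟩; exact ⟨by omega, h2, hr, hp⟩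
          · rintro ⟨h1, h2, hr, hp⟩; exact ⟨by omega, h2, by omega, hp, hr⟩
        have hstep : solveAltStep cs R (c, cov) a = (c + 1, a + R) := by
          unfold solveAltStep
          rw [if_pos hbr]
        rw [hstep, IH (t + 1 - (a + 1)).toNat (by omega) (a + 1) rfl (c + 1) (a + R),
          Lcnt_eq R hR _ hne, hmin, hnext]
        ring
      · have hstep : solveAltStep cs R (c, cov) a = (c, cov) := by
          unfold solveAltStep
          rw [if_neg hbr]
        have hsame : (Finset.Icc (a + 1) t).filter
              (fun j => cov ≤ j ∧ ¬ PySem.List.pyGet? cs j = some 'o')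
            = (Finset.Icc a t).filter
              (fun j => cov ≤ j ∧ ¬ PySem.List.pyGet? cs j = some 'o') := by
          apply Finset.ext
          intro j
          simp only [Finset.mem_filter, Finset.mem_Icc]
          constructor
          · rintro ⟨⟨h1, h2⟩, hp⟩; exact ⟨⟨by omega, h2⟩, hp⟩
          · rintro ⟨⟨h1, h2⟩, hp⟩
            by_cases hj : j = a
            · subst hj; exact absurd hp hbr
            · exact ⟨⟨by omega, h2⟩, hp⟩
        rw [hstep, IH (t + 1 - (a + 1)).toNat (by omega) (a + 1) rfl c cov, hsame]
    · have hnil : PySem.List.pyRange a (t + 1) 1 = [] := by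
        rw [PySem.List.pyRange_one]
        have h0 : (t + 1 - a).toNat = 0 := by omega
        rw [h0]
        simp
      have hempty : (Finset.Icc a t).filter
          (fun j => cov ≤ j ∧ ¬ PySem.List.pyGet? cs j = some 'o') = ∅ := by
        rw [Finset.Icc_eq_empty (by omega), Finset.filter_empty]
      rw [hnil, hempty, Lcnt_empty]
      simp

-- single-character prefix test used by rfind
theorem isPrefixOf_dot (s : List Char) (j : Nat) :
    ['.'].isPrefixOf (s.drop j) = true ↔ s[j]? = some '.' := by
  rw [← List.head?_drop]
  cases hd : s.drop j with
  | nil => simp [List.isPrefixOf]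
  | cons x xs =>
    simp only [List.isPrefixOf, List.head?_cons, Option.some.injEq,
      Bool.and_eq_true, beq_iff_eq]
    constructor
    · rintro ⟨h1, -⟩; exact h1.symm
    · intro h1; exact ⟨h1.symm, by simp [List.isPrefixOf]⟩

theorem rfindGo_spec (s : List Char) (k : Nat) :
    PySem.Chars.rfind.go s ['.'] k = -1 ∨
      (0 ≤ PySem.Chars.rfind.go s ['.'] k ∧
       PySem.Chars.rfind.go s ['.'] k ≤ (k : Int) ∧
       s[(PySem.Chars.rfind.go s ['.'] k).toNat]? = some '.') := by
  induction k with
  | zero =>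
    by_cases h : ['.'].isPrefixOf s = true
    · right
      rw [PySem.Chars.rfind.go, if_pos h]
      refine ⟨le_refl _, le_refl _, ?_⟩
      exact (isPrefixOf_dot s 0).1 (by simpa using h)
    · left
      rw [PySem.Chars.rfind.go, if_neg h]
  | succ j IH =>
    by_cases h : ['.'].isPrefixOf (s.drop (j + 1)) = true
    · right
      rw [PySem.Chars.rfind.go, if_pos h]
      refine ⟨by exact_mod_cast Nat.zero_le _, le_refl _, ?_⟩
      rw [Int.toNat_natCast]
      exact (isPrefixOf_dot s (j + 1)).1 h
    · rw [PySem.Chars.rfind.go, if_neg h]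
      rcases IH with h1 | ⟨h1, h2, h3⟩
      · left; exact h1
      · right; exact ⟨h1, by push_cast; omega, h3⟩

-- t ≠ -1 gives a valid index carrying '.'
theorem rfind_spec (S : String) (h : ¬ PySem.Str.rfind S "." = -1) :
    0 ≤ PySem.Str.rfind S "." ∧
      S.toList[(PySem.Str.rfind S ".").toNat]? = some '.' := by
  rw [PySem.Str.rfind_eq] at h ⊢
  have hl : (".").toList = ['.'] := rfl
  rw [hl] at h ⊢
  unfold PySem.Chars.rfind at h ⊢
  rcases rfindGo_spec S.toList S.toList.length with h1 | ⟨h1, h2, h3⟩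
  · exact absurd h1 h
  · exact ⟨h1, h3⟩

-- ===== VERDICT (by name: the statement is the Claim_ definition above) =====
theorem solve_spec : Claim_equal_solve := by
  intro N R S _ hPre
  show solve N R S = solve_alt N R S
  unfold solve solve_alt
  by_cases ht : PySem.Str.rfind S "." = -1
  · rw [if_pos ht, if_pos ht]
  · rw [if_neg ht, if_neg ht]
    obtain ⟨h0, hget⟩ := rfind_spec S ht
    have hR : 1 ≤ R := by
      rcases hPre with hR | hno
      · exact hR
      · exact absurd (List.mem_of_getElem? hget) hno
    have hcast : ((PySem.Str.rfind S ".").toNat : Int) = PySem.Str.rfind S "." := by omega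
    have hpy : PySem.List.pyGet? S.toList (PySem.Str.rfind S ".") = some '.' := by
      rw [← hcast, PySem.List.pyGet?_natCast]
      exact hget
    have hpt : 0 ≤ PySem.Str.rfind S "." →
        ¬ PySem.List.pyGet? S.toList (PySem.Str.rfind S ".") = some 'o' := by
      intro _
      rw [hpy]
      simp
    rw [solveLoop_spec S.toList R hR _ _ _ (by push_cast; omega) hpt,
      foldB_spec S.toList R (PySem.Str.rfind S ".") hR 0 _ 0,
      Lcnt_eq_Gcnt R hR]
    congr 2
    unfold pts
    apply Finset.filter_congr
    intro j hj
    rw [Finset.mem_Icc] at hj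
    constructor
    · intro hp; exact ⟨hj.1, hp⟩
    · rintro ⟨-, hp⟩; exact hp
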